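-- pv_equiv track=rewrite | github.com/RobinWragg/JaiTools | AutocompleteParser.py | _mask_string_literals
-- ===== SOURCE A (Python) =====
-- def _mask_string_literals(text):
--   inside_string_literal = False
--
--   pieces = []
--   piece_start_index = 0
--
--   for i in range(len(text)):
--     if text[i] == '"' and (i == 0 or text[i-1] != '\\'):
--       if inside_string_literal:
--         pieces.append('"' * (i+1 - piece_start_index))
--         piece_start_index = i + 1
--       else:
--         pieces.append(text[piece_start_index:i])
--         piece_start_index = i
--
--       inside_string_literal = not inside_string_literal
--
--   if not inside_string_literal: # If the file ends inside a string literal, we don't care.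
--     # Append the remaining piece
--     pieces.append(text[piece_start_index:])
--
--   return ''.join(pieces)
-- ===== SOURCE B (Python) =====
-- def _mask_string_literals(text):
--   # Collect the positions of all unescaped quotes, then splice the text
--   # around consecutive (opening, closing) pairs.
--   quotes = [i for i in range(len(text))
--             if text[i] == '"' and (i == 0 or text[i-1] != '\\')]
--   pieces = []
--   prev = 0
--   q = quotes
--   while len(q) >= 2:
--     o, c = q[0], q[1]
--     pieces.append(text[prev:o])
--     pieces.append('"' * (c + 1 - o))
--     prev = c + 1
--     q = q[2:]
--   if q:
--     # text ends inside an unterminated literal: keep only the prefix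
--     # before its opening quote.
--     pieces.append(text[prev:q[0]])
--   else:
--     pieces.append(text[prev:])
--   return ''.join(pieces)
-- ===== Notes on version B (the rewrite author's own statement) =====
-- stated objective: alternative
-- what changed: Instead of a single pass toggling an inside-literal flag, B first collects the indices of all unescaped quotes and then splices the text around consecutive (open,close) index pairs, handling an unterminated trailing literal explicitly.
import Mathlib
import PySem

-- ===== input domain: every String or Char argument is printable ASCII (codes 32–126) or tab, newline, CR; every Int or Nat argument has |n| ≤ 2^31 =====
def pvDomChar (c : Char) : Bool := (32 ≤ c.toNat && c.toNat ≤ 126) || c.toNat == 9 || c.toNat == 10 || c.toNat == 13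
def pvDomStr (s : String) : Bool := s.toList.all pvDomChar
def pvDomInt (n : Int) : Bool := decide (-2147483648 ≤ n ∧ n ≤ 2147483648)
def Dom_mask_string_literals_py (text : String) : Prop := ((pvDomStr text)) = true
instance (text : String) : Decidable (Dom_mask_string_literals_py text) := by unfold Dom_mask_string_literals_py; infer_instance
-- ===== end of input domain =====

-- B replaces A's flag-toggling single pass by collecting the unescaped-quote
-- indices first and splicing the text around consecutive (open, close) pairs
-- (objective: alternative decomposition, same cost).

-- ===== PORT A =====

-- the unescaped-quote test 'text[i] == '"' and (i == 0 or text[i-1] != '\\')'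
def maskQuoteCond (cs : List Char) (i : Int) : Bool :=
  PySem.List.pyGetD cs i ' ' == '"' && (i == 0 || !(PySem.List.pyGetD cs (i - 1) ' ' == '\\'))

-- A's loop body: state = (inside_string_literal, pieces, piece_start_index)
def maskStepA (cs : List Char) (s : Bool × List (List Char) × Int) (i : Int) :
    Bool × List (List Char) × Int :=
  if maskQuoteCond cs i then
    if s.1 then
      (false, s.2.1 ++ [PySem.List.pyRepeat ['"'] (i + 1 - s.2.2)], i + 1)
    else
      (true, s.2.1 ++ [PySem.List.slice cs (some s.2.2) (some i)], i)
  else s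

def mask_string_literals_py (text : String) : String :=
  let cs := text.toList
  let st := (PySem.List.pyRange 0 (PySem.Str.len text) 1).foldl (maskStepA cs) (false, [], 0)
  let pieces := if st.1 then st.2.1 else st.2.1 ++ [PySem.List.slice cs (some st.2.2) none]
  String.ofList (PySem.Chars.join [] pieces)

-- ===== PORT B =====

-- B's while loop: consume the quote-index list two at a time, splicing around
-- each (open, close) pair; a leftover single index is an unterminated literal.
def maskGoB (cs : List Char) (prev : Int) : List Int → List (List Char)
  | [] => [PySem.List.slice cs (some prev) none]
  | [o] => [PySem.List.slice cs (some prev) (some o)]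
  | o :: c :: rest =>
      PySem.List.slice cs (some prev) (some o) ::
      PySem.List.pyRepeat ['"'] (c + 1 - o) :: maskGoB cs (c + 1) rest

def mask_string_literals_py_alt (text : String) : String :=
  let cs := text.toList
  let quotes := (PySem.List.pyRange 0 (PySem.Str.len text) 1).filter (maskQuoteCond cs)
  String.ofList (PySem.Chars.join [] (maskGoB cs 0 quotes))

-- ===== PRECONDITION & SPEC =====
def Spec_mask_string_literals_py (text : String) (out : String) : Prop := out = mask_string_literals_py_alt text
instance (text : String) (out : String) : Decidable (Spec_mask_string_literals_py text out) := by unfold Spec_mask_string_literals_py; infer_instance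

-- ===== CLAIM (what is proved, stated in full; the proofs are below) =====
def Claim_equal_mask_string_literals_py : Prop := ∀ (text : String), Dom_mask_string_literals_py text → Spec_mask_string_literals_py text (mask_string_literals_py text)

-- ===== LEMMAS AND PROOFS =====

-- a fold whose body is a no-op off p is a fold over the p-filtered list
theorem foldl_if_filter {α β : Type} (p : α → Bool) (f : β → α → β) :
    ∀ (l : List α) (init : β),
      l.foldl (fun s i => if p i then f s i else s) init = (l.filter p).foldl f init := by
  intro l
  induction l with
  | nil => intro init; rfl
  | cons x xs ih =>
      intro init
      simp only [List.foldl_cons, List.filter_cons]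
      by_cases h : p x = true
      · simp [h, ih]
      · simp [h, ih]

-- A's fold over the quote indices, finalized, produces exactly B's pieces
theorem foldA_eq_goB (cs : List Char) :
    ∀ (q : List Int) (pieces : List (List Char)) (start : Int),
      (let st := q.foldl
          (fun (s : Bool × List (List Char) × Int) i =>
            if s.1 then
              (false, s.2.1 ++ [PySem.List.pyRepeat ['"'] (i + 1 - s.2.2)], i + 1)
            else
              (true, s.2.1 ++ [PySem.List.slice cs (some s.2.2) (some i)], i))
          (false, pieces, start)
       if st.1 then st.2.1 else st.2.1 ++ [PySem.List.slice cs (some st.2.2) none])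
      = pieces ++ maskGoB cs start q
  | [], pieces, start => by simp [maskGoB]
  | [o], pieces, start => by simp [maskGoB]
  | o :: c :: rest, pieces, start => by
      simp only [List.foldl_cons]
      have := foldA_eq_goB cs rest
        (pieces ++ [PySem.List.slice cs (some start) (some o)] ++
          [PySem.List.pyRepeat ['"'] (c + 1 - o)]) (c + 1)
      simpa [maskGoB, List.append_assoc] using this

-- ===== VERDICT (by name: the statement is the Claim_ definition above) =====
theorem mask_string_literals_py_spec : Claim_equal_mask_string_literals_py := by
  intro text _
  unfold Spec_mask_string_literals_py mask_string_literals_py mask_string_literals_py_alt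
  simp only []
  set cs := text.toList with hcs
  have hfilter := foldl_if_filter (maskQuoteCond cs)
    (fun (s : Bool × List (List Char) × Int) i =>
      if s.1 then
        (false, s.2.1 ++ [PySem.List.pyRepeat ['"'] (i + 1 - s.2.2)], i + 1)
      else
        (true, s.2.1 ++ [PySem.List.slice cs (some s.2.2) (some i)], i))
    (PySem.List.pyRange 0 (PySem.Str.len text) 1) (false, [], 0)
  have hstep : maskStepA cs = (fun s i => if maskQuoteCond cs i then
      (if s.1 then
        (false, s.2.1 ++ [PySem.List.pyRepeat ['"'] (i + 1 - s.2.2)], i + 1)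
      else
        (true, s.2.1 ++ [PySem.List.slice cs (some s.2.2) (some i)], i)) else s) := by
    funext s i; simp [maskStepA]
  rw [hstep, hfilter, foldA_eq_goB]
  simp
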